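-- pv_equiv track=rewrite | github.com/IvanelaKuzmanova/SoftUni-Python-Fundamentals | 05_Lists Advanced - EXERCISE/04_number_classification.py | numbers_checking
-- ===== SOURCE A (Python) =====
-- def numbers_checking(current_list):
--     positives = []
--     negatives = []
--     even = []
--     odd = []
--
--     for number in current_list:
--
--         if number >= 0:
--             positives.append(number)
--         else:
--             negatives.append(number)
--
--         if number % 2 == 0 or number == 0:
--             even.append(number)
--         else:
--             odd.append(number)
--
--     return f'Positive: {", ".join(str(digit) for digit in positives)}\nNegative: {", ".join(str(digit) for digit in negatives)}\nEven: {", ".join(str(digit) for digit in even)}\nOdd: {", ".join(str(digit) for digit in odd)}'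
-- ===== SOURCE B (Python) =====
-- def numbers_checking(current_list):
--     positives = [n for n in current_list if n >= 0]
--     negatives = [n for n in current_list if n < 0]
--     even = [n for n in current_list if n % 2 == 0]
--     odd = [n for n in current_list if n % 2 != 0]
--     return f'Positive: {", ".join(str(x) for x in positives)}\nNegative: {", ".join(str(x) for x in negatives)}\nEven: {", ".join(str(x) for x in even)}\nOdd: {", ".join(str(x) for x in odd)}'
-- ===== Notes on version B (the rewrite author's own statement) =====
-- stated objective: simpler
-- what changed: The single partitioning loop with four mutable accumulators (and the redundant 'or number == 0' test) is replaced by four independent filtering comprehensions over the input list.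
import Mathlib
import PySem

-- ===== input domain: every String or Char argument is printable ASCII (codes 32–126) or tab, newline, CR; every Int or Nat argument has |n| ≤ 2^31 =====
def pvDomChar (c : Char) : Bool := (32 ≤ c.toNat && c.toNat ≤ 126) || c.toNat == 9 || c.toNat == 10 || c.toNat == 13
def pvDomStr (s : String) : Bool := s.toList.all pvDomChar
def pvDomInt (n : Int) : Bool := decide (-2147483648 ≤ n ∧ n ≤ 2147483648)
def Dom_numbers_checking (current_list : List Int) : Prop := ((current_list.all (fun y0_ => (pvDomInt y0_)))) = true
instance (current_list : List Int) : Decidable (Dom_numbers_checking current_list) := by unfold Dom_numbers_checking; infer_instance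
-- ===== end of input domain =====

-- B replaces A's single partitioning loop with four mutable accumulators (and the redundant
-- 'or number == 0') by four independent filtering comprehensions; objective: simpler.

-- shared rendering of the f-string (identical in both Pythons)
def pvRender (positives negatives even odd : List Int) : String :=
  "Positive: " ++ PySem.Str.join ", " (positives.map PySem.Int.toStr) ++
  "\nNegative: " ++ PySem.Str.join ", " (negatives.map PySem.Int.toStr) ++
  "\nEven: " ++ PySem.Str.join ", " (even.map PySem.Int.toStr) ++
  "\nOdd: " ++ PySem.Str.join ", " (odd.map PySem.Int.toStr)

-- ===== PORT A =====
def pvStepA (acc : List Int × List Int × List Int × List Int) (number : Int) :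
    List Int × List Int × List Int × List Int :=
  let (positives, negatives, even, odd) := acc
  let (positives, negatives) :=
    if number ≥ 0 then (positives ++ [number], negatives) else (positives, negatives ++ [number])
  let (even, odd) :=
    if PySem.Int.mod number 2 = 0 ∨ number = 0 then (even ++ [number], odd)
    else (even, odd ++ [number])
  (positives, negatives, even, odd)

def numbers_checking (current_list : List Int) : String :=
  let st := current_list.foldl pvStepA ([], [], [], [])
  pvRender st.1 st.2.1 st.2.2.1 st.2.2.2

-- ===== PORT B =====
def numbers_checking_alt (current_list : List Int) : String :=
  pvRender
    (current_list.filter (fun n => decide (n ≥ 0)))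
    (current_list.filter (fun n => decide (n < 0)))
    (current_list.filter (fun n => PySem.Int.mod n 2 == 0))
    (current_list.filter (fun n => PySem.Int.mod n 2 != 0))

-- ===== PRECONDITION & SPEC =====
def Spec_numbers_checking (current_list : List Int) (out : String) : Prop := out = numbers_checking_alt current_list
instance (current_list : List Int) (out : String) : Decidable (Spec_numbers_checking current_list out) := by unfold Spec_numbers_checking; infer_instance

-- ===== CLAIM (what is proved, stated in full; the proofs are below) =====
def Claim_equal_numbers_checking : Prop := ∀ (current_list : List Int), Dom_numbers_checking current_list → Spec_numbers_checking current_list (numbers_checking current_list)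

-- ===== LEMMAS AND PROOFS =====
theorem pv_mod_zero_of_zero : PySem.Int.mod 0 2 = 0 := by decide

theorem pv_loop (l p n e o : List Int) :
    l.foldl pvStepA (p, n, e, o) =
      (p ++ l.filter (fun x => decide (x ≥ 0)),
       n ++ l.filter (fun x => decide (x < 0)),
       e ++ l.filter (fun x => PySem.Int.mod x 2 == 0),
       o ++ l.filter (fun x => PySem.Int.mod x 2 != 0)) := by
  induction l generalizing p n e o with
  | nil => simp
  | cons x xs ih =>
    have hc : (PySem.Int.mod x 2 = 0 ∨ x = 0) ↔ PySem.Int.mod x 2 = 0 := by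
      constructor
      · rintro (h | rfl)
        · exact h
        · exact pv_mod_zero_of_zero
      · exact Or.inl
    simp only [List.foldl_cons, List.filter_cons, pvStepA, hc]
    by_cases h1 : x ≥ 0 <;> by_cases h2 : PySem.Int.mod x 2 = 0 <;>
      simp_all [ih, PySem.Int.mod, Int.not_le]
    all_goals simp [not_le.mpr h1]

theorem numbers_checking_spec : Claim_equal_numbers_checking := by
  intro l _
  unfold Spec_numbers_checking numbers_checking numbers_checking_alt
  rw [pv_loop]
  simp
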